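-- pv_equiv track=rewrite | github.com/smplkit/python-sdk | src/smplkit/logging/_levels.py | python_level_to_smpl
-- ===== SOURCE A (Python) =====
-- PYTHON_TO_SMPL: dict[int, str] = {
--     5: "TRACE",
--     10: "DEBUG",
--     20: "INFO",
--     30: "WARN",
--     40: "ERROR",
--     50: "FATAL",
-- }
--
-- _SORTED_BREAKPOINTS = sorted(PYTHON_TO_SMPL.keys())
--
-- def python_level_to_smpl(level: int) -> str:
--     """Map a Python logging level int to the nearest smplkit canonical level.
--
--     Exact matches are preferred.  For non-standard levels the nearest lower
--     breakpoint is used; if below all breakpoints, returns ``"TRACE"``.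
--     """
--     if level in PYTHON_TO_SMPL:
--         return PYTHON_TO_SMPL[level]
--     # Find nearest lower breakpoint
--     best = _SORTED_BREAKPOINTS[0]
--     for bp in _SORTED_BREAKPOINTS:
--         if bp <= level:
--             best = bp
--         else:
--             break
--     return PYTHON_TO_SMPL[best]
-- ===== SOURCE B (Python) =====
-- _SORTED_BREAKPOINTS = [5, 10, 20, 30, 40, 50]
-- _NAMES = ["TRACE", "DEBUG", "INFO", "WARN", "ERROR", "FATAL"]
--
--
-- def python_level_to_smpl(level: int) -> str:
--     # Binary search for the rightmost breakpoint <= level, clamped to 0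
--     # so that anything below all breakpoints maps to TRACE.
--     lo, hi = 0, len(_SORTED_BREAKPOINTS)
--     while lo < hi:
--         mid = (lo + hi) // 2
--         if _SORTED_BREAKPOINTS[mid] <= level:
--             lo = mid + 1
--         else:
--             hi = mid
--     return _NAMES[max(lo - 1, 0)]
-- ===== Notes on version B (the rewrite author's own statement) =====
-- stated objective: alternative
-- what changed: Replaced the exact-match dict guard plus linear scan over sorted breakpoints with a single hand-written binary search (bisect_right) whose index, clamped at the lower end, selects the name from a parallel array.
import Mathlib
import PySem

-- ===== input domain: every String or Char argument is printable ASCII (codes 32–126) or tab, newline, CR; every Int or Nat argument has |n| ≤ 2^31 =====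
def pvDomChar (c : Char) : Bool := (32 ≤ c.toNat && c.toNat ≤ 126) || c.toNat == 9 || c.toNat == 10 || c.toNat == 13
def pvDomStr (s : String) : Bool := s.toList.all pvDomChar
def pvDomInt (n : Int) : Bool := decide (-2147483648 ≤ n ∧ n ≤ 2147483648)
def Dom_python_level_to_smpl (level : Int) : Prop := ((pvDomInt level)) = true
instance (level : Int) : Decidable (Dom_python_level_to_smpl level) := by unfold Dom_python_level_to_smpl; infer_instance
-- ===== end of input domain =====

-- B replaces A's exact-match dict guard + linear breakpoint scan with a single binary
-- search over the sorted breakpoints and a parallel name array (objective: alternative).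

-- ===== PORT A =====
def PYTHON_TO_SMPL : PySem.Dict Int String :=
  PySem.Dict.ofList [(5, "TRACE"), (10, "DEBUG"), (20, "INFO"), (30, "WARN"), (40, "ERROR"), (50, "FATAL")]

def pvSortedBreakpoints : List Int := PySem.List.sorted PYTHON_TO_SMPL.keys (fun x => x) false

-- A's for-loop with break, as structural recursion over the same list and 'best' state
def pvLoopA (level : Int) : List Int → Int → Int
  | [], best => best
  | bp :: rest, best => if bp ≤ level then pvLoopA level rest bp else best

def python_level_to_smpl (level : Int) : String :=
  if PYTHON_TO_SMPL.contains level then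
    (PYTHON_TO_SMPL.get? level).getD ""      -- guarded by 'contains': KeyError unreachable
  else
    let best := pvSortedBreakpoints.getD 0 0 -- _SORTED_BREAKPOINTS[0]; list is nonempty
    (PYTHON_TO_SMPL.get? (pvLoopA level pvSortedBreakpoints best)).getD ""

-- ===== PORT B =====
def pvSB : List Int := [5, 10, 20, 30, 40, 50]
def pvNames : List String := ["TRACE", "DEBUG", "INFO", "WARN", "ERROR", "FATAL"]

-- Source B's while-loop: binary search narrowing [lo, hi); indices stay in range
def pvBis (level : Int) (lo hi : Nat) : Nat :=
  if _h : lo < hi then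
    let mid := (lo + hi) / 2
    if pvSB.getD mid 0 ≤ level then pvBis level (mid + 1) hi else pvBis level lo mid
  else lo
termination_by hi - lo
decreasing_by all_goals omega

def python_level_to_smpl_alt (level : Int) : String :=
  -- Python's max(lo - 1, 0) is Nat truncated subtraction here
  pvNames.getD (pvBis level 0 pvSB.length - 1) ""

-- ===== PRECONDITION & SPEC =====
def Spec_python_level_to_smpl (level : Int) (out : String) : Prop := out = python_level_to_smpl_alt level
instance (level : Int) (out : String) : Decidable (Spec_python_level_to_smpl level out) := by unfold Spec_python_level_to_smpl; infer_instance

-- ===== CLAIM (what is proved, stated in full; the proofs are below) =====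
def Claim_equal_python_level_to_smpl : Prop := ∀ (level : Int), Dom_python_level_to_smpl level → Spec_python_level_to_smpl level (python_level_to_smpl level)

-- ===== LEMMAS AND PROOFS =====
-- A = B on all of Int: split off the six exact breakpoints, then the seven intervals
theorem pvAB_eq (level : Int) : python_level_to_smpl level = python_level_to_smpl_alt level := by
  have hd : PYTHON_TO_SMPL = PySem.Dict.mk [(5, "TRACE"), (10, "DEBUG"), (20, "INFO"), (30, "WARN"), (40, "ERROR"), (50, "FATAL")] := by decide
  have hs : pvSortedBreakpoints = [5, 10, 20, 30, 40, 50] := by decide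
  by_cases e5 : level = 5
  · subst e5; simp [python_level_to_smpl, python_level_to_smpl_alt, hd, hs, pvBis, pvSB, pvNames, pvLoopA, PySem.Dict.get?_mk_cons]
  by_cases e10 : level = 10
  · subst e10; simp [python_level_to_smpl, python_level_to_smpl_alt, hd, hs, pvBis, pvSB, pvNames, pvLoopA, PySem.Dict.get?_mk_cons]
  by_cases e20 : level = 20
  · subst e20; simp [python_level_to_smpl, python_level_to_smpl_alt, hd, hs, pvBis, pvSB, pvNames, pvLoopA, PySem.Dict.get?_mk_cons]
  by_cases e30 : level = 30
  · subst e30; simp [python_level_to_smpl, python_level_to_smpl_alt, hd, hs, pvBis, pvSB, pvNames, pvLoopA, PySem.Dict.get?_mk_cons]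
  by_cases e40 : level = 40
  · subst e40; simp [python_level_to_smpl, python_level_to_smpl_alt, hd, hs, pvBis, pvSB, pvNames, pvLoopA, PySem.Dict.get?_mk_cons]
  by_cases e50 : level = 50
  · subst e50; simp [python_level_to_smpl, python_level_to_smpl_alt, hd, hs, pvBis, pvSB, pvNames, pvLoopA, PySem.Dict.get?_mk_cons]
  rcases lt_or_ge level 5 with h | h1
  · simp [python_level_to_smpl, python_level_to_smpl_alt, hd, hs, pvBis, pvSB, pvNames, pvLoopA, PySem.Dict.get?_mk_cons, show ¬((5:Int) = level) by omega, show ¬((10:Int) = level) by omega, show ¬((20:Int) = level) by omega, show ¬((30:Int) = level) by omega, show ¬((40:Int) = level) by omega, show ¬((50:Int) = level) by omega, show ¬(5 ≤ level) by omega, show ¬(10 ≤ level) by omega, show ¬(30 ≤ level) by omega]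
  rcases lt_or_ge level 10 with h | h2
  · simp [python_level_to_smpl, python_level_to_smpl_alt, hd, hs, pvBis, pvSB, pvNames, pvLoopA, PySem.Dict.get?_mk_cons, show ¬((5:Int) = level) by omega, show ¬((10:Int) = level) by omega, show ¬((20:Int) = level) by omega, show ¬((30:Int) = level) by omega, show ¬((40:Int) = level) by omega, show ¬((50:Int) = level) by omega, show 5 ≤ level by omega, show ¬(10 ≤ level) by omega, show ¬(30 ≤ level) by omega]
  rcases lt_or_ge level 20 with h | h3
  · simp [python_level_to_smpl, python_level_to_smpl_alt, hd, hs, pvBis, pvSB, pvNames, pvLoopA, PySem.Dict.get?_mk_cons, show ¬((5:Int) = level) by omega, show ¬((10:Int) = level) by omega, show ¬((20:Int) = level) by omega, show ¬((30:Int) = level) by omega, show ¬((40:Int) = level) by omega, show ¬((50:Int) = level) by omega, show 5 ≤ level by omega, show 10 ≤ level by omega, show ¬(20 ≤ level) by omega, show ¬(30 ≤ level) by omega]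
  rcases lt_or_ge level 30 with h | h4
  · simp [python_level_to_smpl, python_level_to_smpl_alt, hd, hs, pvBis, pvSB, pvNames, pvLoopA, PySem.Dict.get?_mk_cons, show ¬((5:Int) = level) by omega, show ¬((10:Int) = level) by omega, show ¬((20:Int) = level) by omega, show ¬((30:Int) = level) by omega, show ¬((40:Int) = level) by omega, show ¬((50:Int) = level) by omega, show 5 ≤ level by omega, show 10 ≤ level by omega, show 20 ≤ level by omega, show ¬(30 ≤ level) by omega]
  rcases lt_or_ge level 40 with h | h5
  · simp [python_level_to_smpl, python_level_to_smpl_alt, hd, hs, pvBis, pvSB, pvNames, pvLoopA, PySem.Dict.get?_mk_cons, show ¬((5:Int) = level) by omega, show ¬((10:Int) = level) by omega, show ¬((20:Int) = level) by omega, show ¬((30:Int) = level) by omega, show ¬((40:Int) = level) by omega, show ¬((50:Int) = level) by omega, show 5 ≤ level by omega, show 10 ≤ level by omega, show 20 ≤ level by omega, show 30 ≤ level by omega, show ¬(40 ≤ level) by omega, show ¬(50 ≤ level) by omega]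
  rcases lt_or_ge level 50 with h | h6
  · simp [python_level_to_smpl, python_level_to_smpl_alt, hd, hs, pvBis, pvSB, pvNames, pvLoopA, PySem.Dict.get?_mk_cons, show ¬((5:Int) = level) by omega, show ¬((10:Int) = level) by omega, show ¬((20:Int) = level) by omega, show ¬((30:Int) = level) by omega, show ¬((40:Int) = level) by omega, show ¬((50:Int) = level) by omega, show 5 ≤ level by omega, show 10 ≤ level by omega, show 20 ≤ level by omega, show 30 ≤ level by omega, show 40 ≤ level by omega, show ¬(50 ≤ level) by omega]
  · simp [python_level_to_smpl, python_level_to_smpl_alt, hd, hs, pvBis, pvSB, pvNames, pvLoopA, PySem.Dict.get?_mk_cons, show ¬((5:Int) = level) by omega, show ¬((10:Int) = level) by omega, show ¬((20:Int) = level) by omega, show ¬((30:Int) = level) by omega, show ¬((40:Int) = level) by omega, show ¬((50:Int) = level) by omega, show 5 ≤ level by omega, show 10 ≤ level by omega, show 20 ≤ level by omega, show 30 ≤ level by omega, show 40 ≤ level by omega, show 50 ≤ level by omega]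

-- ===== VERDICT (by name: the statement is the Claim_ definition above) =====
theorem python_level_to_smpl_spec : Claim_equal_python_level_to_smpl := by
  intro level _
  unfold Spec_python_level_to_smpl
  exact pvAB_eq level
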